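-- pv_equiv track=rewrite | github.com/baxthus/AdventOfCode | 2015/Day3/main.py | count_houses_with_presents2
-- ===== SOURCE A (Python) =====
-- def count_houses_with_presents2(directions):
--     santa_x, santa_y = 0, 0
--     robot_x, robot_y = 0, 0
--     visited = set([(0, 0)])
--
--     for i, direction in enumerate(directions):
--         if i % 2 == 0:
--             if direction == '^':
--                 santa_y += 1
--             elif direction == 'v':
--                 santa_y -= 1
--             elif direction == '>':
--                 santa_x += 1
--             elif direction == '<':
--                 santa_x -= 1
--             visited.add((santa_x, santa_y))
--         else:
--             if direction == '^':
--                 robot_y += 1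
--             elif direction == 'v':
--                 robot_y -= 1
--             elif direction == '>':
--                 robot_x += 1
--             elif direction == '<':
--                 robot_x -= 1
--             visited.add((robot_x, robot_y))
--
--     return len(visited)
-- ===== SOURCE B (Python) =====
-- def _walk(seq):
--     x, y = 0, 0
--     positions = {(0, 0)}
--     for d in seq:
--         if d == '^':
--             y += 1
--         elif d == 'v':
--             y -= 1
--         elif d == '>':
--             x += 1
--         elif d == '<':
--             x -= 1
--         positions.add((x, y))
--     return positions
--
--
-- def count_houses_with_presents2(directions):
--     moves = list(directions)
--     return len(_walk(moves[0::2]) | _walk(moves[1::2]))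
-- ===== Notes on version B (the rewrite author's own statement) =====
-- stated objective: alternative
-- what changed: Replaces the single parity-branching loop over enumerate with two independent single-actor walks over the even-index and odd-index subsequences, unioning their position sets.
import Mathlib
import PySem

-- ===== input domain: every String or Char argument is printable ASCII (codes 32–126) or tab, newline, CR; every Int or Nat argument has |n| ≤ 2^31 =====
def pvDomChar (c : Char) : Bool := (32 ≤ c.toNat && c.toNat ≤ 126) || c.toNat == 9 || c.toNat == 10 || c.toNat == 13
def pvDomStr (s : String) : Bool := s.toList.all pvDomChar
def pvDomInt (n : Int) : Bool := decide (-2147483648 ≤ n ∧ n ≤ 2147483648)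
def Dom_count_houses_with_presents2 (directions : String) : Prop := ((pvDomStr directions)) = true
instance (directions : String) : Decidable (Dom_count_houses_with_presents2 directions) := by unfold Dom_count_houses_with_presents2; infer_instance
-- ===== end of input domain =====

-- B replaces the parity-branching loop with two independent walks over the even/odd subsequences, unioned (alternative decomposition).


-- ===== PORT A =====
-- state: (santa_x, santa_y, robot_x, robot_y, visited)
def pvStateA : Type := (Int × Int) × (Int × Int) × PySem.Set (Int × Int)

def pvStepA (st : pvStateA) (p : Int × Char) : pvStateA :=
  let (i, direction) := p
  let (santa, robot, visited) := st
  if PySem.Int.mod i 2 = 0 then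
    let santa' :=
      if direction = '^' then (santa.1, santa.2 + 1)
      else if direction = 'v' then (santa.1, santa.2 - 1)
      else if direction = '>' then (santa.1 + 1, santa.2)
      else if direction = '<' then (santa.1 - 1, santa.2)
      else santa
    (santa', robot, PySem.Set.add visited santa')
  else
    let robot' :=
      if direction = '^' then (robot.1, robot.2 + 1)
      else if direction = 'v' then (robot.1, robot.2 - 1)
      else if direction = '>' then (robot.1 + 1, robot.2)
      else if direction = '<' then (robot.1 - 1, robot.2)
      else robot
    (santa, robot', PySem.Set.add visited robot')

def count_houses_with_presents2 (directions : String) : Int :=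
  let init : pvStateA := (((0, 0) : Int × Int), ((0, 0) : Int × Int), PySem.Set.ofList [((0, 0) : Int × Int)])
  let fin := (PySem.List.enumerate directions.toList 0).foldl pvStepA init
  (PySem.Set.len fin.2.2 : Int)

-- ===== PORT B =====
-- one move of a single actor (same branch chain as Source B's _walk body)
def pvMove (p : Int × Int) (d : Char) : Int × Int :=
  if d = '^' then (p.1, p.2 + 1)
  else if d = 'v' then (p.1, p.2 - 1)
  else if d = '>' then (p.1 + 1, p.2)
  else if d = '<' then (p.1 - 1, p.2)
  else p

-- _walk: fold over the sequence carrying (position, visited-set), return the set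
def pvWalk (seq : List Char) : PySem.Set (Int × Int) :=
  (seq.foldl
    (fun (st : (Int × Int) × PySem.Set (Int × Int)) d =>
      let q := pvMove st.1 d
      (q, PySem.Set.add st.2 q))
    (((0, 0) : Int × Int), PySem.Set.ofList [((0, 0) : Int × Int)])).2

-- moves[0::2] : every second element from index 0 (hand port of a step-2 slice; exact)
def pvEvens {α : Type} : List α → List α
  | [] => []
  | [x] => [x]
  | x :: _ :: xs => x :: pvEvens xs

-- moves[1::2] : every second element from index 1 (exact)
def pvOdds {α : Type} (l : List α) : List α := pvEvens l.tail

def count_houses_with_presents2_alt (directions : String) : Int :=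
  let moves := directions.toList
  (PySem.Set.len (PySem.Set.union (pvWalk (pvEvens moves)) (pvWalk (pvOdds moves))) : Int)

-- ===== PRECONDITION & SPEC =====
def Spec_count_houses_with_presents2 (directions : String) (out : Int) : Prop := out = count_houses_with_presents2_alt directions
instance (directions : String) (out : Int) : Decidable (Spec_count_houses_with_presents2 directions out) := by unfold Spec_count_houses_with_presents2; infer_instance

-- ===== CLAIM (what is proved, stated in full; the proofs are below) =====
def Claim_equal_count_houses_with_presents2 : Prop := ∀ (directions : String), Dom_count_houses_with_presents2 directions → Spec_count_houses_with_presents2 directions (count_houses_with_presents2 directions)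

-- ===== LEMMAS AND PROOFS =====

-- positions visited after each move of a single actor starting at p
def pvPosns (p : Int × Int) : List Char → List (Int × Int)
  | [] => []
  | d :: ds => pvMove p d :: pvPosns (pvMove p d) ds

theorem pvEvens_cons {α : Type} (x : α) (l : List α) : pvEvens (x :: l) = x :: pvEvens l.tail := by
  cases l <;> simp [pvEvens]

theorem pvWalk_go_mem (seq : List Char) (p : Int × Int) (vis : PySem.Set (Int × Int)) (q : Int × Int) :
    q ∈ (seq.foldl (fun (st : (Int × Int) × PySem.Set (Int × Int)) d =>
        let r := pvMove st.1 d
        (r, PySem.Set.add st.2 r)) (p, vis)).2 ↔ q ∈ vis ∨ q ∈ pvPosns p seq := by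
  induction seq generalizing p vis with
  | nil => simp [pvPosns]
  | cons d ds ih => simp [pvPosns, ih, PySem.Set.mem_add]; tauto

theorem pvWalk_go_nodup (seq : List Char) (p : Int × Int) (vis : PySem.Set (Int × Int))
    (h : vis.Nodup) :
    ((seq.foldl (fun (st : (Int × Int) × PySem.Set (Int × Int)) d =>
        let r := pvMove st.1 d
        (r, PySem.Set.add st.2 r)) (p, vis)).2).Nodup := by
  induction seq generalizing p vis with
  | nil => exact h
  | cons d ds ih => exact ih _ _ (PySem.Set.nodup_add _ _ h)

theorem pvWalk_mem (seq : List Char) (q : Int × Int) :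
    q ∈ pvWalk seq ↔ q = (0, 0) ∨ q ∈ pvPosns (0, 0) seq := by
  unfold pvWalk
  rw [pvWalk_go_mem]
  simp [PySem.Set.mem_ofList]

theorem pvWalk_nodup (seq : List Char) : (pvWalk seq).Nodup := by
  unfold pvWalk
  exact pvWalk_go_nodup _ _ _ (by simp [PySem.Set.nodup_ofList])

-- A's interleaved loop: membership and nodup of the visited set, starting at an even index 2*k
theorem pvStepA_even (k : Int) (d : Char) (s r : Int × Int) (vis : PySem.Set (Int × Int)) :
    pvStepA (s, r, vis) (2 * k, d) = (pvMove s d, r, PySem.Set.add vis (pvMove s d)) := by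
  simp [pvStepA, pvMove]

theorem pvStepA_odd (k : Int) (d : Char) (s r : Int × Int) (vis : PySem.Set (Int × Int)) :
    pvStepA (s, r, vis) (2 * k + 1, d) = (s, pvMove r d, PySem.Set.add vis (pvMove r d)) := by
  simp [pvStepA, pvMove]

theorem pvLoopA_inv (xs : List Char) : ∀ (k : Int) (s r : Int × Int) (vis : PySem.Set (Int × Int)),
    (∀ q, q ∈ ((PySem.List.enumerate xs (2 * k)).foldl pvStepA (s, r, vis)).2.2 ↔
        q ∈ vis ∨ q ∈ pvPosns s (pvEvens xs) ∨ q ∈ pvPosns r (pvOdds xs)) ∧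
    (vis.Nodup → ((PySem.List.enumerate xs (2 * k)).foldl pvStepA (s, r, vis)).2.2.Nodup) := by
  induction xs using pvEvens.induct with
  | case1 =>
    intro k s r vis
    simp [PySem.List.enumerate_nil, pvPosns, pvEvens, pvOdds]
  | case2 a =>
    intro k s r vis
    rw [PySem.List.enumerate_cons, PySem.List.enumerate_nil, List.foldl_cons, List.foldl_nil,
      pvStepA_even]
    refine ⟨fun q => ?_, fun h => PySem.Set.nodup_add _ _ h⟩
    simp [pvEvens, pvOdds, pvPosns, PySem.Set.mem_add]
  | case3 a b rest ih =>
    intro k s r vis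
    have h2 : 2 * k + 1 + 1 = 2 * (k + 1) := by ring
    rw [PySem.List.enumerate_cons, PySem.List.enumerate_cons, List.foldl_cons, List.foldl_cons,
      pvStepA_even, pvStepA_odd, h2]
    obtain ⟨ihm, ihn⟩ := ih (k + 1) (pvMove s a) (pvMove r b)
      (PySem.Set.add (PySem.Set.add vis (pvMove s a)) (pvMove r b))
    refine ⟨fun q => ?_, fun h => ihn (PySem.Set.nodup_add _ _ (PySem.Set.nodup_add _ _ h))⟩
    rw [ihm q]
    have he : pvEvens (a :: b :: rest) = a :: pvEvens rest := rfl
    have ho : pvOdds (a :: b :: rest) = b :: pvOdds rest := by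
      show pvEvens (b :: rest) = _
      rw [pvEvens_cons]; rfl
    rw [he, ho]
    simp [pvPosns, PySem.Set.mem_add]
    tauto

theorem count_houses_with_presents2_spec : Claim_equal_count_houses_with_presents2 := by
  intro directions _
  unfold Spec_count_houses_with_presents2 count_houses_with_presents2 count_houses_with_presents2_alt
  have hz : PySem.List.enumerate directions.toList 0 = PySem.List.enumerate directions.toList (2 * 0) := by norm_num
  obtain ⟨hm, hn⟩ := pvLoopA_inv directions.toList 0 (0, 0) (0, 0)
    (PySem.Set.ofList [((0, 0) : Int × Int)])
  have hA : (((PySem.List.enumerate directions.toList (2 * 0)).foldl pvStepA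
      ((0, 0), (0, 0), PySem.Set.ofList [((0, 0) : Int × Int)])).2.2).Perm
      (PySem.Set.union (pvWalk (pvEvens directions.toList)) (pvWalk (pvOdds directions.toList))) := by
    rw [List.perm_ext_iff_of_nodup (hn (by simp [PySem.Set.nodup_ofList]))
      (PySem.Set.nodup_union _ _ (pvWalk_nodup _))]
    intro q
    rw [hm q, PySem.Set.mem_union, pvWalk_mem, pvWalk_mem]
    simp [PySem.Set.mem_ofList]
    tauto
  simp only [PySem.Set.len, hz, hA.length_eq]
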